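-- pv_equiv track=rewrite | github.com/Honglin20/CodeWeaver | codeweaver/code_db/query.py | _parse_symbols_from_md
-- ===== SOURCE A (Python) =====
-- def _parse_symbols_from_md(content: str, file_name: str) -> list[dict]:
--     """Parse symbols from markdown content."""
--     symbols = []
--     lines = content.split("\n")
--
--     current_symbol = None
--     current_description = None
--
--     for line in lines:
--         if line.startswith("### "):
--             # Save previous symbol
--             if current_symbol:
--                 symbols.append({
--                     "name": current_symbol,
--                     "description": current_description or "(no description)",
--                     "file": file_name,
--                 })
--
--             # Start new symbol
--             current_symbol = line[4:].strip()
--             current_description = None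
--
--         elif line.startswith("**Description:**"):
--             current_description = line.split("**Description:**")[1].strip()
--
--     # Save last symbol
--     if current_symbol:
--         symbols.append({
--             "name": current_symbol,
--             "description": current_description or "(no description)",
--             "file": file_name,
--         })
--
--     return symbols
-- ===== SOURCE B (Python) =====
-- def _parse_symbols_from_md(content: str, file_name: str) -> list[dict]:
--     """Parse symbols from markdown content: partition lines into '### ' blocks, then map each block to a dict."""
--     blocks = []
--     for line in content.split("\n"):
--         if line.startswith("### "):
--             blocks.append([line])
--         elif blocks:
--             blocks[-1].append(line)
--     result = []
--     for block in blocks: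
--         name = block[0][4:].strip()
--         if not name:
--             continue
--         desc = next((l.split("**Description:**")[1].strip()
--                      for l in reversed(block)
--                      if l.startswith("**Description:**")), "")
--         result.append({"name": name,
--                        "description": desc or "(no description)",
--                        "file": file_name})
--     return result
-- ===== Notes on version B (the rewrite author's own statement) =====
-- stated objective: alternative
-- what changed: Replaces A's single stateful scan (current_symbol/current_description threaded through one loop) with a two-phase decomposition: partition the lines into '### '-headed blocks, then map each block independently to its dict, taking the last Description line via a reversed first-match.
import Mathlib
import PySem

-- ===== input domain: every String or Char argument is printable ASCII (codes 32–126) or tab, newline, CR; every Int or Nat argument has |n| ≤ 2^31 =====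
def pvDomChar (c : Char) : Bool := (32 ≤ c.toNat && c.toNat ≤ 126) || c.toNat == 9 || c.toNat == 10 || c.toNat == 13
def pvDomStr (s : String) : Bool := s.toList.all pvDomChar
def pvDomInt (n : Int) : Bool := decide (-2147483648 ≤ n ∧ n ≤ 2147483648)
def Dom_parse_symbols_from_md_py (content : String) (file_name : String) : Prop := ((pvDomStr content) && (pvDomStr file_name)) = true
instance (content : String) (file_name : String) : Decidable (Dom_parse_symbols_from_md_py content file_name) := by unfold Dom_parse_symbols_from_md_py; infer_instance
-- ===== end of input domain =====

-- B re-implements A as a partition-into-blocks pass followed by a per-block map (alternative decomposition, same cost); return values proved equal on all inputs.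

-- ===== PORT A =====
-- one loop step of A: state = (symbols, current_symbol, current_description)
-- ('line.split("**Description:**")[1]' is ported as '.getD 1 ""': in this branch the
-- line starts with the separator, so index 1 always exists and Python never raises)
def pyAStep (file_name : String)
    (st : List (List (String × String)) × Option String × Option String) (line : String) :
    List (List (String × String)) × Option String × Option String :=
  if PySem.Str.startswith line "### " then
    let symbols :=
      match st.2.1 with
      | some s =>
        if s = "" then st.1
        else st.1 ++ [[("name", s),
                       ("description",
                         match st.2.2 with
                         | some d => if d = "" then "(no description)" else d
                         | none => "(no description)"),
                       ("file", file_name)]]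
      | none => st.1
    (symbols, some (PySem.Str.strip (PySem.Str.slice line (some 4) none)), none)
  else if PySem.Str.startswith line "**Description:**" then
    (st.1, st.2.1, some (PySem.Str.strip (((PySem.Str.split? line "**Description:**").getD []).getD 1 "")))
  else st

def parse_symbols_from_md_py (content : String) (file_name : String) : List (List (String × String)) :=
  let lines := ((PySem.Str.split? content "\n").getD [])
  let st := lines.foldl (pyAStep file_name) ([], none, none)
  match st.2.1 with
  | some s =>
    if s = "" then st.1
    else st.1 ++ [[("name", s),
                   ("description",
                     match st.2.2 with
                     | some d => if d = "" then "(no description)" else d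
                     | none => "(no description)"),
                   ("file", file_name)]]
  | none => st.1

-- ===== PORT B =====
-- first pass of B: open a new block on '### ', else append to the last open block
def pyBBlocksStep (blocks : List (List String)) (line : String) : List (List String) :=
  if PySem.Str.startswith line "### " then blocks ++ [[line]]
  else if blocks.isEmpty then blocks
  else blocks.dropLast ++ [(blocks.getLast?.getD []) ++ [line]]

-- second pass of B: one block -> zero or one dicts appended to the result
-- ('block[0]' is ported as '.getD 0 ""': blocks are built nonempty, Python never raises;
--  'l.split("**Description:**")[1]' as '.getD 1 ""' exactly as in port A)
def pyBBlockStep (file_name : String)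
    (res : List (List (String × String))) (block : List String) : List (List (String × String)) :=
  let name := PySem.Str.strip (PySem.Str.slice (block.getD 0 "") (some 4) none)
  if name = "" then res
  else
    let desc := ((block.reverse.find? (fun l => PySem.Str.startswith l "**Description:**")).map
        (fun l => PySem.Str.strip (((PySem.Str.split? l "**Description:**").getD []).getD 1 ""))).getD ""
    res ++ [[("name", name),
             ("description", if desc = "" then "(no description)" else desc),
             ("file", file_name)]]

def parse_symbols_from_md_py_alt (content : String) (file_name : String) : List (List (String × String)) :=
  let blocks := (((PySem.Str.split? content "\n").getD [])).foldl pyBBlocksStep []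
  blocks.foldl (pyBBlockStep file_name) []

-- ===== PRECONDITION & SPEC =====
def Spec_parse_symbols_from_md_py (content : String) (file_name : String) (out : List (List (String × String))) : Prop := out = parse_symbols_from_md_py_alt content file_name
instance (content : String) (file_name : String) (out : List (List (String × String))) : Decidable (Spec_parse_symbols_from_md_py content file_name out) := by unfold Spec_parse_symbols_from_md_py; infer_instance

-- ===== CLAIM (what is proved, stated in full; the proofs are below) =====
def Claim_equal_parse_symbols_from_md_py : Prop := ∀ (content : String) (file_name : String), Dom_parse_symbols_from_md_py content file_name → Spec_parse_symbols_from_md_py content file_name (parse_symbols_from_md_py content file_name)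

-- ===== LEMMAS AND PROOFS =====

-- per-line abbreviations (proof-side only)
def pvIsH (l : String) : Bool := PySem.Str.startswith l "### "
def pvIsD (l : String) : Bool := PySem.Str.startswith l "**Description:**"
def pvName (l : String) : String := PySem.Str.strip (PySem.Str.slice l (some 4) none)
def pvParseD (l : String) : String := PySem.Str.strip (((PySem.Str.split? l "**Description:**").getD []).getD 1 "")

-- the dict A emits for a (truthy) symbol with optional description
def pvEmit (file_name : String) (sym : Option String) (desc : Option String) :
    List (List (String × String)) :=
  match sym with
  | some s =>
    if s = "" then []
    else [[("name", s),
           ("description", match desc with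
             | some d => if d = "" then "(no description)" else d
             | none => "(no description)"),
           ("file", file_name)]]
  | none => []

-- A's remaining output from state (sym, desc) on the remaining lines
def pvRunA (file_name : String) : List String → Option String → Option String →
    List (List (String × String))
  | [], sym, desc => pvEmit file_name sym desc
  | l :: ls, sym, desc =>
    if pvIsH l then pvEmit file_name sym desc ++ pvRunA file_name ls (some (pvName l)) none
    else if pvIsD l then pvRunA file_name ls sym (some (pvParseD l))
    else pvRunA file_name ls sym desc

-- recursive characterisation of B's block partition
def pvBlocks : List String → List (List String)
  | [] => []
  | l :: ls =>
    if pvIsH l then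
      (l :: ls.takeWhile (fun x => !pvIsH x)) :: pvBlocks (ls.dropWhile (fun x => !pvIsH x))
    else pvBlocks ls
termination_by ls => ls.length
decreasing_by
  · have := List.length_dropWhile_le (fun x => !pvIsH x) ls; simp; omega
  · simp

-- description threading of A over a run of non-header lines
def pvUpdD (desc : Option String) (ls : List String) : Option String :=
  ls.foldl (fun d l => if pvIsD l then some (pvParseD l) else d) desc

-- what B emits for one block
def pvBlockOut (file_name : String) (block : List String) : List (List (String × String)) :=
  let name := PySem.Str.strip (PySem.Str.slice (block.getD 0 "") (some 4) none)
  if name = "" then []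
  else
    let desc := ((block.reverse.find? (fun l => PySem.Str.startswith l "**Description:**")).map
        (fun l => PySem.Str.strip (((PySem.Str.split? l "**Description:**").getD []).getD 1 ""))).getD ""
    [[("name", name),
      ("description", if desc = "" then "(no description)" else desc),
      ("file", file_name)]]

theorem pvBlockStep_eq (file_name : String) (res : List (List (String × String)))
    (block : List String) :
    pyBBlockStep file_name res block = res ++ pvBlockOut file_name block := by
  simp only [pyBBlockStep, pvBlockOut]
  split_ifs <;> simp

-- the final save after A's loop, as in the port's tail
def pvFin (file_name : String)
    (st : List (List (String × String)) × Option String × Option String) :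
    List (List (String × String)) :=
  match st.2.1 with
  | some s =>
    if s = "" then st.1
    else st.1 ++ [[("name", s),
                   ("description",
                     match st.2.2 with
                     | some d => if d = "" then "(no description)" else d
                     | none => "(no description)"),
                   ("file", file_name)]]
  | none => st.1

-- A's foldl equals pvRunA
theorem pvA_foldl (file_name : String) (ls : List String)
    (acc : List (List (String × String))) (sym desc : Option String) :
    pvFin file_name (ls.foldl (pyAStep file_name) (acc, sym, desc))
    = acc ++ pvRunA file_name ls sym desc := by
  induction ls generalizing acc sym desc with
  | nil =>
    simp only [List.foldl_nil, pvRunA, pvEmit, pvFin]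
    cases sym with
    | none => simp
    | some s => by_cases hs : s = "" <;> simp [hs]
  | cons l ls ih =>
    simp only [List.foldl_cons, pvRunA]
    by_cases h1 : pvIsH l
    · have hstep : pyAStep file_name (acc, sym, desc) l =
        (acc ++ pvEmit file_name sym desc, some (pvName l), none) := by
        simp only [pyAStep, pvEmit, pvName]
        rw [if_pos (by simpa [pvIsH] using h1)]
        cases sym with
        | none => simp
        | some s => by_cases hs : s = "" <;> simp [hs]
      rw [hstep, ih, if_pos h1, List.append_assoc]
    · by_cases h2 : pvIsD l
      · have hstep : pyAStep file_name (acc, sym, desc) l =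
          (acc, sym, some (pvParseD l)) := by
          simp only [pyAStep, pvParseD]
          rw [if_neg (by simpa [pvIsH] using h1), if_pos (by simpa [pvIsD] using h2)]
        rw [hstep, ih, if_neg h1, if_pos h2]
      · have hstep : pyAStep file_name (acc, sym, desc) l = (acc, sym, desc) := by
          simp only [pyAStep]
          rw [if_neg (by simpa [pvIsH] using h1), if_neg (by simpa [pvIsD] using h2)]
        rw [hstep, ih, if_neg h1, if_neg h2]

-- B's first foldl with an open last block
theorem pvB_foldl_open (ls : List String) (acc : List (List String)) (cur : List String) :
    ls.foldl pyBBlocksStep (acc ++ [cur]) =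
      acc ++ (cur ++ ls.takeWhile (fun x => !pvIsH x)) ::
        pvBlocks (ls.dropWhile (fun x => !pvIsH x)) := by
  induction ls generalizing acc cur with
  | nil => simp [pvBlocks]
  | cons l ls ih =>
    simp only [List.foldl_cons]
    by_cases h1 : pvIsH l
    · have hstep : pyBBlocksStep (acc ++ [cur]) l = (acc ++ [cur]) ++ [[l]] := by
        simp [pyBBlocksStep, pvIsH] at h1 ⊢; simp [h1]
      rw [hstep, ih (acc ++ [cur]) [l]]
      simp [h1, pvBlocks]
    · have hstep : pyBBlocksStep (acc ++ [cur]) l = acc ++ [cur ++ [l]] := by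
        simp only [pyBBlocksStep]
        rw [if_neg (by simpa [pvIsH] using h1)]
        simp
      rw [hstep, ih acc (cur ++ [l])]
      simp [h1]

-- B's first foldl from the empty state equals pvBlocks
theorem pvB_foldl (ls : List String) :
    ls.foldl pyBBlocksStep [] = pvBlocks ls := by
  induction ls with
  | nil => simp [pvBlocks]
  | cons l ls ih =>
    simp only [List.foldl_cons]
    by_cases h1 : pvIsH l
    · have hstep : pyBBlocksStep [] l = [] ++ [[l]] := by
        simp [pyBBlocksStep, pvIsH] at h1 ⊢; simp [h1]
      rw [hstep, pvB_foldl_open, pvBlocks, if_pos h1]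
      simp
    · have hstep : pyBBlocksStep [] l = [] := by
        simp only [pyBBlocksStep]
        rw [if_neg (by simpa [pvIsH] using h1)]
        simp
      rw [hstep, ih, pvBlocks, if_neg h1]

-- skipping leading non-header lines does not change the partition
theorem pvBlocks_dropWhile (ls : List String) :
    pvBlocks ls = pvBlocks (ls.dropWhile (fun x => !pvIsH x)) := by
  induction ls with
  | nil => rfl
  | cons l ls ih =>
    by_cases h1 : pvIsH l
    · simp [h1]
    · rw [pvBlocks, if_neg h1, ih]
      simp [h1]

-- a header line is not a description line
theorem pvIsH_not_isD (l : String) (h : pvIsH l = true) : pvIsD l = false := by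
  by_contra hc
  rw [Bool.not_eq_false] at hc
  rw [pvIsH, PySem.Str.startswith_eq, PySem.Chars.startswith_iff] at h
  rw [pvIsD, PySem.Str.startswith_eq, PySem.Chars.startswith_iff] at hc
  obtain ⟨t1, h1⟩ := h
  obtain ⟨t2, h2⟩ := hc
  rw [← h1] at h2
  simp at h2

-- A's last-description-wins over a run of lines equals B's reversed first-match
theorem pvUpdD_eq_find (ls : List String) :
    pvUpdD none ls = (ls.reverse.find? (fun l => pvIsD l)).map pvParseD := by
  induction ls using List.reverseRecOn with
  | nil => simp [pvUpdD]
  | append_singleton ls l ih =>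
    simp only [pvUpdD, List.foldl_append, List.foldl_cons, List.foldl_nil,
      List.reverse_append, List.reverse_cons, List.reverse_nil, List.nil_append,
      List.cons_append, List.find?_cons]
    by_cases h : pvIsD l
    · simp [h]
    · simpa [pvUpdD, h] using ih

-- per block: A's emit equals B's block output
theorem pvEmit_eq_blockOut (file_name l : String) (tl : List String)
    (hH : pvIsH l = true) :
    pvEmit file_name (some (pvName l)) (pvUpdD none tl) = pvBlockOut file_name (l :: tl) := by
  have hname : (l :: tl).getD 0 "" = l := rfl
  simp only [pvBlockOut, hname, pvEmit]
  have hfind : ((l :: tl).reverse.find? (fun x => PySem.Str.startswith x "**Description:**"))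
      = tl.reverse.find? (fun x => pvIsD x) := by
    have : (l :: tl).reverse = tl.reverse ++ [l] := by simp
    rw [this, List.find?_append]
    have hD : pvIsD l = false := pvIsH_not_isD l hH
    simp [pvIsD] at hD
    have hl : [l].find? (fun x => PySem.Str.startswith x "**Description:**") = none := by
      simp [hD]
    rw [hl]
    simp [pvIsD]
  rw [hfind, pvUpdD_eq_find]
  cases hf : tl.reverse.find? (fun x => pvIsD x) with
  | none => simp [pvName]
  | some d => simp [pvName, pvParseD]

-- the main bridge: A's run equals the flattened block outputs
theorem pvRunA_eq_blocks (file_name : String) (ls : List String) (sym desc : Option String) :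
    pvRunA file_name ls sym desc =
      pvEmit file_name sym (pvUpdD desc (ls.takeWhile (fun x => !pvIsH x)))
        ++ (pvBlocks ls).flatMap (pvBlockOut file_name) := by
  induction ls generalizing sym desc with
  | nil => simp [pvRunA, pvBlocks, pvUpdD]
  | cons l ls ih =>
    by_cases h1 : pvIsH l
    · rw [pvRunA, if_pos h1, ih, pvBlocks, if_pos h1]
      have htake : (l :: ls).takeWhile (fun x => !pvIsH x) = [] := by
        simp [h1]
      rw [htake]
      rw [pvEmit_eq_blockOut file_name l (ls.takeWhile (fun x => !pvIsH x)) h1]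
      rw [pvBlocks_dropWhile ls]
      simp [pvUpdD, List.flatMap_cons]
    · by_cases h2 : pvIsD l
      · rw [pvRunA, if_neg (by simp [h1]), if_pos h2, ih, pvBlocks, if_neg h1]
        simp [h1, pvUpdD, h2]
      · rw [pvRunA, if_neg (by simp [h1]), if_neg (by simp [h2]), ih, pvBlocks, if_neg h1]
        simp [h1, pvUpdD, h2]

-- ===== VERDICT (by name: the statement is the Claim_ definition above) =====
theorem parse_symbols_from_md_py_spec : Claim_equal_parse_symbols_from_md_py := by
  intro content file_name _
  unfold Spec_parse_symbols_from_md_py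
  have hB : parse_symbols_from_md_py_alt content file_name
      = (pvBlocks ((PySem.Str.split? content "\n").getD [])).flatMap (pvBlockOut file_name) := by
    have h0 : parse_symbols_from_md_py_alt content file_name
        = (((PySem.Str.split? content "\n").getD []).foldl pyBBlocksStep []).foldl
            (pyBBlockStep file_name) [] := rfl
    rw [h0, pvB_foldl]
    have hfun : pyBBlockStep file_name = fun res b => res ++ pvBlockOut file_name b :=
      funext fun res => funext fun b => pvBlockStep_eq file_name res b
    rw [hfun, PySem.List.foldl_append_eq_flatMap]
    simp
  have hA : parse_symbols_from_md_py content file_name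
      = pvRunA file_name ((PySem.Str.split? content "\n").getD []) none none := by
    have h0 : parse_symbols_from_md_py content file_name
        = pvFin file_name (((PySem.Str.split? content "\n").getD []).foldl
            (pyAStep file_name) ([], none, none)) := rfl
    rw [h0]
    simpa using pvA_foldl file_name ((PySem.Str.split? content "\n").getD []) [] none none
  rw [hA, hB, pvRunA_eq_blocks]
  simp [pvEmit]
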